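-- pv_equiv track=rewrite | github.com/kootenpv/cliche | mincli/__init__.py | parse_sphinx_param_descriptions
-- ===== SOURCE A (Python) =====
-- def parse_sphinx_param_descriptions(doc):
--     stack = {}
--     results = {}
--     for line in doc.split("\n"):
--         line = line.strip()
--         if line.startswith(":"):
--             if stack:
--                 results[stack["fn"]] = "\n".join(stack["lines"])
--             stack = {}
--             if line.startswith(":param"):
--                 fn_name = line.split(":")[1].split()[-1]
--                 stack = {"fn": fn_name, "lines": [line.split(":")[2].strip()]}
--         elif stack:
--             stack["lines"].append(line.strip())
--     if stack:
--         results[stack["fn"]] = "\n".join(stack["lines"])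
--     return results
-- ===== SOURCE B (Python) =====
-- def parse_sphinx_param_descriptions(doc):
--     # Phase 1: group stripped lines into blocks, a new block at each ':'-starting line.
--     blocks = []
--     cur = None
--     for raw in doc.split("\n"):
--         s = raw.strip()
--         if s.startswith(":"):
--             if cur is not None:
--                 blocks.append(cur)
--             cur = (s, [])
--         elif cur is not None:
--             cur[1].append(s)
--     if cur is not None:
--         blocks.append(cur)
--     # Phase 2: map the ':param' blocks into the results dict.
--     results = {}
--     for header, tail in blocks:
--         parts = header.split(":")
--         if header.startswith(":param"):
--             results[parts[1].split()[-1]] = "\n".join([parts[2].strip()] + tail)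
--     return results
-- ===== Notes on version B (the rewrite author's own statement) =====
-- stated objective: alternative
-- what changed: Replaces A's flush-on-delimiter state machine (a dict 'stack' mutated while scanning) with two explicit phases: first group the stripped lines into blocks delimited by ':'-starting lines, then map each ':param' block to its dict entry.
import Mathlib
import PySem

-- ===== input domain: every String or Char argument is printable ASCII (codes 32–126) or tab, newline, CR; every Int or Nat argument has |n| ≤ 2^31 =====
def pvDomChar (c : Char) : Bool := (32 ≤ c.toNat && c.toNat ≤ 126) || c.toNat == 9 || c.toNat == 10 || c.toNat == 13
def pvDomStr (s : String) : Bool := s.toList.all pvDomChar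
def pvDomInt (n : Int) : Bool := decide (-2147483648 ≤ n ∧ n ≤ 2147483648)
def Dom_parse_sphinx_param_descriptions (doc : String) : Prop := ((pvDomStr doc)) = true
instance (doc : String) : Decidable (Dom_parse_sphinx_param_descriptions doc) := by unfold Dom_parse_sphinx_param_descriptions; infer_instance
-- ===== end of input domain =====

-- B replaces A's flush-on-delimiter state machine with an explicit two-phase
-- grouping (lines -> blocks, then blocks -> dict); same cost, different decomposition.


-- ===== PORT A =====
-- 'results[stack["fn"]] = "\n".join(stack["lines"])' guarded by 'if stack:'
def aFlush (results : PySem.Dict String String) (stack : Option (String × List String)) :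
    PySem.Dict String String :=
  match stack with
  | some (fn, ls) => results.insert fn (PySem.Str.join "\n" ls)
  | none => results

-- one iteration of A's 'for line in doc.split("\n")' loop; state = (results, stack)
def aStep (st : PySem.Dict String String × Option (String × List String)) (raw : String) :
    PySem.Dict String String × Option (String × List String) :=
  let line := PySem.Str.strip raw
  if PySem.Str.startswith line ":" then
    let results := aFlush st.1 st.2
    if PySem.Str.startswith line ":param" then
      -- line.split(":")[1].split()[-1]; under Pre_ indices 1 and 2 exist and the
      -- whitespace split is non-empty, so the getD defaults are never used
      let parts := (PySem.Str.split? line ":").getD []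
      let fn := ((PySem.Str.split₀ (parts.getD 1 "")).getLast?).getD ""
      (results, some (fn, [PySem.Str.strip (parts.getD 2 "")]))
    else
      (results, none)
  else
    match st.2 with
    | some (fn, ls) => (st.1, some (fn, ls ++ [PySem.Str.strip line]))
    | none => st

def parse_sphinx_param_descriptions (doc : String) : List (String × String) :=
  let st := ((PySem.Str.split? doc "\n").getD []).foldl aStep (PySem.Dict.empty, none)
  (aFlush st.1 st.2).items

-- ===== PORT B =====
-- phase 1: one iteration of the grouping loop; state = (blocks, cur)
def bGroup (acc : List (String × List String) × Option (String × List String)) (raw : String) :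
    List (String × List String) × Option (String × List String) :=
  let s := PySem.Str.strip raw
  if PySem.Str.startswith s ":" then
    ((match acc.2 with | some b => acc.1 ++ [b] | none => acc.1), some (s, []))
  else
    match acc.2 with
    | some (h, tl) => (acc.1, some (h, tl ++ [s]))
    | none => acc

-- phase 2: fold one block into the results dict (only ':param' blocks emit)
def bEmit (d : PySem.Dict String String) (blk : String × List String) :
    PySem.Dict String String :=
  let parts := (PySem.Str.split? blk.1 ":").getD []
  if PySem.Str.startswith blk.1 ":param" then
    d.insert (((PySem.Str.split₀ (parts.getD 1 "")).getLast?).getD "")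
      (PySem.Str.join "\n" (PySem.Str.strip (parts.getD 2 "") :: blk.2))
  else d

def parse_sphinx_param_descriptions_alt (doc : String) : List (String × String) :=
  let g := ((PySem.Str.split? doc "\n").getD []).foldl bGroup ([], none)
  let blocks := g.1 ++ (match g.2 with | some b => [b] | none => [])
  (blocks.foldl bEmit PySem.Dict.empty).items

-- ===== PRECONDITION & SPEC =====
-- Pre_ excludes exactly the docstrings on which A (and B alike) raises IndexError:
-- a stripped line starting with ":param" that contains no second ':'.
def Pre_parse_sphinx_param_descriptions (doc : String) : Prop :=
  ∀ raw ∈ (PySem.Str.split? doc "\n").getD [],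
    PySem.Str.startswith (PySem.Str.strip raw) ":param" = true →
    3 ≤ ((PySem.Str.split? (PySem.Str.strip raw) ":").getD []).length
instance (doc : String) : Decidable (Pre_parse_sphinx_param_descriptions doc) := by
  unfold Pre_parse_sphinx_param_descriptions; infer_instance

def pvWitness_parse_sphinx_param_descriptions : String :=
  ":param x: a desc\n  more\n:returns: y\n:param a b: z"

def Spec_parse_sphinx_param_descriptions (doc : String) (out : List (String × String)) : Prop := out = parse_sphinx_param_descriptions_alt doc
instance (doc : String) (out : List (String × String)) : Decidable (Spec_parse_sphinx_param_descriptions doc out) := by unfold Spec_parse_sphinx_param_descriptions; infer_instance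

-- ===== CLAIM (what is proved, stated in full; the proofs are below) =====
def Claim_equal_parse_sphinx_param_descriptions : Prop := ∀ (doc : String), Dom_parse_sphinx_param_descriptions doc → Pre_parse_sphinx_param_descriptions doc → Spec_parse_sphinx_param_descriptions doc (parse_sphinx_param_descriptions doc)

-- ===== LEMMAS AND PROOFS =====

-- B's current block, seen through A's eyes: A's stack at the same point of the scan
def stackOf (cur : Option (String × List String)) : Option (String × List String) :=
  match cur with
  | none => none
  | some (h, tl) =>
    if PySem.Str.startswith h ":param" then
      some ((((PySem.Str.split₀ (((PySem.Str.split? h ":").getD []).getD 1 "")).getLast?).getD ""),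
            PySem.Str.strip (((PySem.Str.split? h ":").getD []).getD 2 "") :: tl)
    else none

theorem dropWhile_idem {α : Type} (p : α → Bool) (l : List α) :
    List.dropWhile p (List.dropWhile p l) = List.dropWhile p l := by
  induction l with
  | nil => rfl
  | cons a t ih =>
    by_cases h : p a = true
    · simp [List.dropWhile_cons, h, ih]
    · simp [List.dropWhile_cons, h]

theorem dropWhile_prefix_fixed {α : Type} (p : α → Bool) (l m : List α)
    (hfix : List.dropWhile p l = l) (hpre : m <+: l) :
    List.dropWhile p m = m := by
  cases m with
  | nil => rfl
  | cons a t =>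
    cases l with
    | nil => exact absurd (List.eq_nil_of_prefix_nil hpre) (by simp)
    | cons b u =>
      have hab : a = b := by
        rcases hpre with ⟨r, hr⟩
        simpa using congrArg (·.head?) hr
      subst hab
      have hp : p a = false := by
        by_contra hpa
        simp only [Bool.not_eq_false] at hpa
        rw [List.dropWhile_cons, if_pos hpa] at hfix
        have := congrArg List.length hfix
        have hle := List.length_dropWhile_le p u
        simp at this; omega
      simp [List.dropWhile_cons, hp]

theorem chars_strip_idem (l : List Char) :
    PySem.Chars.strip (PySem.Chars.strip l) = PySem.Chars.strip l := by
  unfold PySem.Chars.strip PySem.Chars.rstrip PySem.Chars.lstrip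
  set p := PySem.Chars.isspace
  set m := List.dropWhile p l with hm
  have hmfix : List.dropWhile p m = m := dropWhile_idem p l
  set r := (List.dropWhile p m.reverse).reverse with hr
  have h1 : List.dropWhile p m.reverse <:+ m.reverse := List.dropWhile_suffix p
  have hrpre : r <+: m := by simpa using h1.reverse
  have h2 : List.dropWhile p r = r := dropWhile_prefix_fixed p m r hmfix hrpre
  rw [h2, hr]
  simp [dropWhile_idem]

theorem strip_idem (s : String) :
    PySem.Str.strip (PySem.Str.strip s) = PySem.Str.strip s := by
  unfold PySem.Str.strip
  rw [String.toList_ofList, chars_strip_idem]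

-- flushing A's stack = emitting B's pending block
theorem flush_emit (d : PySem.Dict String String) (cur : Option (String × List String)) :
    aFlush d (stackOf cur)
      = ((match cur with | some b => [b] | none => ([] : List (String × List String)))).foldl bEmit d := by
  rcases cur with _ | ⟨h, tl⟩
  · rfl
  · simp only [List.foldl_cons, List.foldl_nil]
    by_cases hp : PySem.Str.startswith h ":param" = true
    · simp only [stackOf, bEmit, aFlush, hp, if_true]
    · rw [Bool.not_eq_true] at hp
      simp only [stackOf, bEmit, aFlush, hp, Bool.false_eq_true, if_false]

-- same, started from the accumulated block list
theorem flush_emit' (d : PySem.Dict String String) (bs : List (String × List String))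
    (cur : Option (String × List String)) (hd : d = bs.foldl bEmit PySem.Dict.empty) :
    aFlush d (stackOf cur)
      = ((match cur with | some b => bs ++ [b] | none => bs)).foldl bEmit PySem.Dict.empty := by
  rcases cur with _ | b
  · simpa [stackOf, aFlush] using hd
  · rw [List.foldl_append, ← hd]
    simpa using flush_emit d (some b)

-- one line of A's loop mirrors one line of B's grouping loop
theorem step_lemma (d : PySem.Dict String String) (bs : List (String × List String))
    (cur : Option (String × List String)) (raw : String)
    (hd : d = bs.foldl bEmit PySem.Dict.empty) :
    aStep (d, stackOf cur) raw
      = ((bGroup (bs, cur) raw).1.foldl bEmit PySem.Dict.empty,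
         stackOf (bGroup (bs, cur) raw).2) := by
  by_cases hs : PySem.Str.startswith (PySem.Str.strip raw) ":" = true
  · have hfst := flush_emit' d bs cur hd
    by_cases hp : PySem.Str.startswith (PySem.Str.strip raw) ":param" = true
    · simp only [aStep, bGroup, hs, hp, if_true]
      rw [Prod.mk.injEq]
      refine ⟨?_, ?_⟩
      · rcases cur with _ | b <;> simpa using hfst
      · simp only [stackOf, hp, if_true]
    · rw [Bool.not_eq_true] at hp
      simp only [aStep, bGroup, hs, hp, Bool.false_eq_true, if_true, if_false]
      rw [Prod.mk.injEq]
      refine ⟨?_, ?_⟩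
      · rcases cur with _ | b <;> simpa using hfst
      · simp only [stackOf, hp, Bool.false_eq_true, if_false]
  · rw [Bool.not_eq_true] at hs
    rcases cur with _ | ⟨h, tl⟩
    · simp only [aStep, bGroup, stackOf, hs, Bool.false_eq_true, if_false]
      exact Prod.ext_iff.mpr ⟨hd, rfl⟩
    · by_cases hp : PySem.Str.startswith h ":param" = true
      · simp only [aStep, bGroup, stackOf, hs, hp, Bool.false_eq_true, if_false, if_true,
          strip_idem raw]
        exact Prod.ext_iff.mpr ⟨hd, by simp⟩
      · rw [Bool.not_eq_true] at hp
        simp only [aStep, bGroup, stackOf, hs, hp, Bool.false_eq_true, if_false]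
        exact Prod.ext_iff.mpr ⟨hd, rfl⟩

-- the loop invariant relating A's scan to B's grouping scan
theorem invariant (L : List String) (d : PySem.Dict String String)
    (bs : List (String × List String)) (cur : Option (String × List String))
    (hd : d = bs.foldl bEmit PySem.Dict.empty) :
    L.foldl aStep (d, stackOf cur)
      = ((L.foldl bGroup (bs, cur)).1.foldl bEmit PySem.Dict.empty,
         stackOf (L.foldl bGroup (bs, cur)).2) := by
  induction L generalizing d bs cur with
  | nil =>
    simp only [List.foldl_nil]
    exact Prod.ext_iff.mpr ⟨hd, rfl⟩
  | cons raw L ih =>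
    simp only [List.foldl_cons]
    rw [step_lemma d bs cur raw hd]
    have := ih ((bGroup (bs, cur) raw).1.foldl bEmit PySem.Dict.empty)
      (bGroup (bs, cur) raw).1 (bGroup (bs, cur) raw).2 rfl
    simpa using this

theorem main (doc : String) :
    parse_sphinx_param_descriptions doc = parse_sphinx_param_descriptions_alt doc := by
  have h0 := invariant ((PySem.Str.split? doc "\n").getD []) PySem.Dict.empty [] none rfl
  rw [show stackOf none = none from rfl] at h0
  simp only [parse_sphinx_param_descriptions, parse_sphinx_param_descriptions_alt, List.foldl_nil] at h0 ⊢
  rw [h0, flush_emit, ← List.foldl_append]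

-- ===== VERDICT (by name: the statement is the Claim_ definition above) =====
theorem parse_sphinx_param_descriptions_spec : Claim_equal_parse_sphinx_param_descriptions := by
  intro doc _ _
  exact main doc
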